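-- pv_equiv track=rewrite | github.com/geekynerdbiker/outsourcing | python-workspace/python-alg_hard/prob3.py | get_possible_points
-- ===== SOURCE A (Python) =====
-- def get_possible_points(points, position):
--     closest_points = []
--     x, y = position
--
--     closest_points.append(
--         min([(px, py) for px, py in points if px == x], key=lambda p: (abs(y - p[1]), p[1]), default=None))
--     closest_points.append(
--         min([(px, py) for px, py in points if py == y], key=lambda p: (abs(x - p[0]), p[0]), default=None))
--
--     return [p for p in closest_points if p]
-- ===== SOURCE B (Python) =====
-- def _closest(vals, t):
--     """vals is sorted strictly increasing; return the v minimizing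
--     (abs(t - v), v), i.e. the nearer of the predecessor-or-equal and the
--     successor of t, preferring the smaller value on a distance tie."""
--     prev = None
--     for v in vals:
--         if v > t:
--             if prev is None or t - prev > v - t:
--                 return v
--             return prev
--         prev = v
--     return prev
--
--
-- def get_possible_points(points, position):
--     x, y = position
--     c = _closest(sorted({py for px, py in points if px == x}), y)
--     r = _closest(sorted({px for px, py in points if py == y}), x)
--     out = []
--     if c is not None:
--         out.append((x, c))
--     if r is not None:
--         out.append((r, y))
--     return out
-- ===== Notes on version B (the rewrite author's own statement) =====
-- stated objective: alternative
-- what changed: A selects each candidate by min over a filtered list with the tuple key (abs(dist), coord); B never computes that key: it builds the sorted set of candidate coordinates and picks the nearer of the predecessor-or-equal and the successor of the target (preferring the smaller on a distance tie), an order-based neighbour search instead of key minimisation.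
import Mathlib
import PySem

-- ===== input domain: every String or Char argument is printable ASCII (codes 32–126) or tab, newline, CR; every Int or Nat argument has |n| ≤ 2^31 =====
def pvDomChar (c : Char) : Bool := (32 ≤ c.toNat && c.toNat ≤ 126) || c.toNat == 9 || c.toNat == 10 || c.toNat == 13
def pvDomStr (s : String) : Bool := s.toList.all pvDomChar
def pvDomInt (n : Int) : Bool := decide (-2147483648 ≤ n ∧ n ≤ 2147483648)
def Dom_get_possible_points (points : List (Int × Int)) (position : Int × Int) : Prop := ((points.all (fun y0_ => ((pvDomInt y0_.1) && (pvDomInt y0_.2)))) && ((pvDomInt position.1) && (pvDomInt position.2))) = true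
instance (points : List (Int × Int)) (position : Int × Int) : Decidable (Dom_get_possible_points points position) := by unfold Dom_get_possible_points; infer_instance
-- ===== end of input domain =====

-- B replaces A's min-with-tuple-key over each filtered list by a neighbour search
-- on the sorted set of candidate coordinates (objective: alternative algorithm).

-- ===== PORT A =====
-- min(..., key=lambda p: (k1, k2), default=None) is PySem.List.min2?;
-- the comprehension '[(px, py) for px, py in points if px == x]' is filter + the
-- destructuring re-pairing map (fun p => (p.1, p.2)).
def get_possible_points (points : List (Int × Int)) (position : Int × Int) : List (Int × Int) :=
  let x := position.1
  let y := position.2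
  let closest_points : List (Option (Int × Int)) := []
  let closest_points := closest_points ++
    [PySem.List.min2? ((points.filter (fun p => p.1 == x)).map (fun p => (p.1, p.2)))
      (fun p => |y - p.2|) (fun p => p.2)]
  let closest_points := closest_points ++
    [PySem.List.min2? ((points.filter (fun p => p.2 == y)).map (fun p => (p.1, p.2)))
      (fun p => |x - p.1|) (fun p => p.1)]
  -- '[p for p in closest_points if p]': a tuple is always truthy, None is falsy
  closest_points.filterMap (fun o => o)

-- ===== PORT B =====
-- '_closest(vals, t)': walk the sorted strictly-increasing list keeping the last
-- value ≤ t; at the first value > t pick the nearer of the two (tie → the smaller)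
def pvClosestGo (t : Int) (prev : Option Int) : List Int → Option Int
  | [] => prev
  | v :: rest =>
    if t < v then
      match prev with
      | none => some v
      | some p => if t - p > v - t then some v else some p
    else pvClosestGo t (some v) rest

def pvClosest (vals : List Int) (t : Int) : Option Int := pvClosestGo t none vals

-- 'sorted({… for px, py in points if …})' is sorted of the PySem.Set of the
-- filtered coordinates (identity key, injective, so the set's order is immaterial)
def get_possible_points_alt (points : List (Int × Int)) (position : Int × Int) : List (Int × Int) :=
  let x := position.1
  let y := position.2
  let c := pvClosest (PySem.List.sorted
    (PySem.Set.ofList ((points.filter (fun p => p.1 == x)).map (fun p => p.2)))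
    (fun v => v) false) y
  let r := pvClosest (PySem.List.sorted
    (PySem.Set.ofList ((points.filter (fun p => p.2 == y)).map (fun p => p.1)))
    (fun v => v) false) x
  let out : List (Int × Int) := []
  let out := match c with
    | some c => out ++ [(x, c)]
    | none => out
  let out := match r with
    | some r => out ++ [(r, y)]
    | none => out
  out

-- ===== PRECONDITION & SPEC =====
def Spec_get_possible_points (points : List (Int × Int)) (position : Int × Int) (out : List (Int × Int)) : Prop := out = get_possible_points_alt points position
instance (points : List (Int × Int)) (position : Int × Int) (out : List (Int × Int)) : Decidable (Spec_get_possible_points points position out) := by unfold Spec_get_possible_points; infer_instance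

-- ===== CLAIM (what is proved, stated in full; the proofs are below) =====
def Claim_equal_get_possible_points : Prop := ∀ (points : List (Int × Int)) (position : Int × Int), Dom_get_possible_points points position → Spec_get_possible_points points position (get_possible_points points position)

-- ===== LEMMAS AND PROOFS =====

-- 'a is at least as good a candidate as b' for target t: strictly smaller
-- distance, or equal distance and a ≤ b (Python's tuple key (abs(t-v), v))
def pvLe (t a b : Int) : Prop := |t - a| < |t - b| ∨ (|t - a| = |t - b| ∧ a ≤ b)

lemma pvLe_refl (t a : Int) : pvLe t a a := Or.inr ⟨rfl, le_refl a⟩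

lemma pvLe_trans {t a b c : Int} (h1 : pvLe t a b) (h2 : pvLe t b c) : pvLe t a c := by
  unfold pvLe at *; omega

lemma pvLe_antisymm {t a b : Int} (h1 : pvLe t a b) (h2 : pvLe t b a) : a = b := by
  unfold pvLe at *; omega

lemma pvLe_of_gt_le {t a b : Int} (h1 : t < a) (h2 : a ≤ b) : pvLe t a b := by
  unfold pvLe
  rw [abs_of_nonpos (by omega), abs_of_nonpos (by omega)]
  omega

lemma pvLe_of_le_ge {t a b : Int} (h1 : a ≤ t) (h2 : b ≤ a) : pvLe t a b := by
  unfold pvLe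
  rw [abs_of_nonneg (by omega), abs_of_nonneg (by omega)]
  omega

-- comparing the predecessor p ≤ t with the successor t < v
lemma pvLe_succ_pred {t p v : Int} (hp : p ≤ t) (hv : t < v) (h : t - p > v - t) :
    pvLe t v p := by
  unfold pvLe
  rw [abs_of_nonpos (by omega), abs_of_nonneg (by omega)]
  omega

lemma pvLe_pred_succ {t p v : Int} (hp : p ≤ t) (hv : t < v) (h : ¬ t - p > v - t) :
    pvLe t p v := by
  unfold pvLe
  rw [abs_of_nonneg (by omega), abs_of_nonpos (by omega)]
  omega

-- the fold step of min2? with keys (|t - ·|, id), as a named function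
def pvMinStep (t : Int) (acc : Option Int) (v : Int) : Option Int :=
  match acc with
  | none => some v
  | some m =>
    if (decide (|t - v| < |t - m|) || !decide (|t - m| < |t - v|) && decide (v < m)) then some v
    else some m

lemma min2?_eq_fold (vs : List Int) (t : Int) :
    PySem.List.min2? vs (fun v => |t - v|) (fun v => v) = vs.foldl (pvMinStep t) none := by
  unfold PySem.List.min2?
  congr 1
  funext acc v
  cases acc <;> rfl

lemma pvMinStep_some {t m v : Int} :
    ∃ m', pvMinStep t (some m) v = some m' ∧ (m' = m ∨ m' = v) ∧ pvLe t m' m ∧ pvLe t m' v := by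
  unfold pvMinStep
  by_cases h : (decide (|t - v| < |t - m|) || !decide (|t - m| < |t - v|) && decide (v < m)) = true
  · refine ⟨v, by simp [h], Or.inr rfl, ?_, pvLe_refl t v⟩
    simp only [Bool.or_eq_true, Bool.and_eq_true, Bool.not_eq_eq_eq_not, Bool.not_true,
      decide_eq_true_eq, decide_eq_false_iff_not] at h
    unfold pvLe; omega
  · refine ⟨m, by simp [h], Or.inl rfl, pvLe_refl t m, ?_⟩
    simp only [Bool.or_eq_true, Bool.and_eq_true, Bool.not_eq_eq_eq_not, Bool.not_true,
      decide_eq_true_eq, decide_eq_false_iff_not, not_or, not_and] at h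
    unfold pvLe; omega

lemma foldl_minstep_spec (t : Int) :
    ∀ (l : List Int) (m : Int), ∃ m', l.foldl (pvMinStep t) (some m) = some m' ∧
      (m' = m ∨ m' ∈ l) ∧ pvLe t m' m ∧ ∀ w ∈ l, pvLe t m' w := by
  intro l
  induction l with
  | nil => exact fun m => ⟨m, rfl, Or.inl rfl, pvLe_refl t m, by simp⟩
  | cons v rest ih =>
    intro m
    obtain ⟨m₂, hstep, hmem₂, hm₂m, hm₂v⟩ := pvMinStep_some (t := t) (m := m) (v := v)
    obtain ⟨m', hfold, hmem', hle', hall'⟩ := ih m₂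
    refine ⟨m', by simpa [hstep] using hfold, ?_, pvLe_trans hle' hm₂m, ?_⟩
    · rcases hmem' with h | h
      · rcases hmem₂ with h2 | h2
        · exact Or.inl (h.trans h2)
        · exact Or.inr (by simp [h, h2])
      · exact Or.inr (by simp [h])
    · intro w hw
      rcases List.mem_cons.mp hw with h | h
      · exact h ▸ pvLe_trans hle' hm₂v
      · exact hall' w h

-- A's selection: min2? on a nonempty list returns the unique pvLe-minimiser
lemma min2?_spec (t : Int) (vs : List Int) (hne : vs ≠ []) :
    ∃ m, PySem.List.min2? vs (fun v => |t - v|) (fun v => v) = some m ∧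
      m ∈ vs ∧ ∀ w ∈ vs, pvLe t m w := by
  rw [min2?_eq_fold]
  cases vs with
  | nil => exact absurd rfl hne
  | cons v rest =>
    obtain ⟨m', hfold, hmem, hlev, hall⟩ := foldl_minstep_spec t rest v
    refine ⟨m', by simpa [pvMinStep] using hfold, ?_, ?_⟩
    · rcases hmem with h | h
      · simp [h]
      · exact List.mem_cons_of_mem _ h
    · intro w hw
      rcases List.mem_cons.mp hw with h | h
      · exact h ▸ hlev
      · exact hall w h

-- B's selection: on a strictly increasing list the neighbour walk returns the
-- unique pvLe-minimiser over a superset sl whose not-yet-seen part prev dominates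
lemma closestGo_spec (t : Int) :
    ∀ (rest : List Int) (prev : Option Int) (sl : List Int),
      rest.Pairwise (· < ·) →
      (∀ p, prev = some p → p ≤ t ∧ p ∈ sl ∧ ∀ v ∈ rest, p < v) →
      (∀ u ∈ rest, u ∈ sl) →
      (∀ w ∈ sl, w ∈ rest ∨ ∃ p, prev = some p ∧ pvLe t p w) →
      (match pvClosestGo t prev rest with
       | none => prev = none ∧ rest = []
       | some m => m ∈ sl ∧ ∀ w ∈ sl, pvLe t m w) := by
  intro rest
  induction rest with
  | nil =>
    intro prev sl _ hp _ hcov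
    cases prev with
    | none => exact ⟨rfl, rfl⟩
    | some p =>
      obtain ⟨_, hpmem, _⟩ := hp p rfl
      refine ⟨hpmem, fun w hw => ?_⟩
      rcases hcov w hw with h | ⟨p', hp', hle⟩
      · simp at h
      · cases Option.some.inj hp'; exact hle
  | cons v rest' ih =>
    intro prev sl hpw hp hsub hcov
    rcases List.pairwise_cons.mp hpw with ⟨hvlt, hpw'⟩
    by_cases hv : t < v
    · cases prev with
      | none =>
        simp only [pvClosestGo, if_pos hv]
        refine ⟨hsub v (by simp), fun w hw => ?_⟩
        rcases hcov w hw with h | ⟨p, hp', _⟩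
        · rcases List.mem_cons.mp h with h | h
          · exact h ▸ pvLe_refl t v
          · exact pvLe_of_gt_le hv (le_of_lt (hvlt w h))
        · simp at hp'
      | some p =>
        obtain ⟨hple, hpmem, hplt⟩ := hp p rfl
        have hdomw : ∀ w ∈ sl, pvLe t p w ∨ w = v ∨ w ∈ rest' := by
          intro w hw
          rcases hcov w hw with h | ⟨p', hp', hle⟩
          · exact Or.inr (List.mem_cons.mp h)
          · cases Option.some.inj hp'; exact Or.inl hle
        simp only [pvClosestGo, if_pos hv]
        by_cases hc : t - p > v - t
        · simp only [if_pos hc]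
          have hvp : pvLe t v p := pvLe_succ_pred hple hv hc
          refine ⟨hsub v (by simp), fun w hw => ?_⟩
          rcases hdomw w hw with h | h | h
          · exact pvLe_trans hvp h
          · exact h ▸ pvLe_refl t v
          · exact pvLe_of_gt_le hv (le_of_lt (hvlt w h))
        · simp only [if_neg hc]
          have hpv : pvLe t p v := pvLe_pred_succ hple hv hc
          refine ⟨hpmem, fun w hw => ?_⟩
          rcases hdomw w hw with h | h | h
          · exact h
          · exact h ▸ hpv
          · exact pvLe_trans hpv (pvLe_of_gt_le hv (le_of_lt (hvlt w h)))
    · have h' := ih (some v) sl hpw'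
        (fun p hp' => by
          cases Option.some.inj hp'
          exact ⟨by omega, hsub v (by simp), hvlt⟩)
        (fun u hu => hsub u (by simp [hu]))
        (fun w hw => by
          rcases hcov w hw with h | ⟨p, hp', hle⟩
          · rcases List.mem_cons.mp h with h | h
            · exact Or.inr ⟨v, rfl, h ▸ pvLe_refl t v⟩
            · exact Or.inl h
          · obtain ⟨hple, _, hplt⟩ := hp p hp'
            exact Or.inr ⟨v, rfl, pvLe_trans (pvLe_of_le_ge (by omega) (le_of_lt (hplt v (by simp)))) hle⟩)
      simp only [pvClosestGo, if_neg hv]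
      cases hres : pvClosestGo t (some v) rest' with
      | none => rw [hres] at h'; exact absurd h'.1 (by simp)
      | some m => rw [hres] at h'; exact h'

-- the central fact: A's min-with-key over vs equals B's neighbour walk over
-- the sorted set of vs
lemma min_eq_closest (vs : List Int) (t : Int) :
    PySem.List.min2? vs (fun v => |t - v|) (fun v => v) =
      pvClosest (PySem.List.sorted (PySem.Set.ofList vs) (fun v => v) false) t := by
  by_cases hne : vs = []
  · subst hne; rfl
  · obtain ⟨m₁, hmin, hm₁mem, hm₁all⟩ := min2?_spec t vs hne
    have hofne : PySem.Set.ofList vs ≠ [] := by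
      intro h
      rcases List.exists_mem_of_ne_nil vs hne with ⟨w, hw⟩
      have := (PySem.Set.mem_ofList vs w).mpr hw
      simp [h] at this
    have hmemsl : ∀ w, w ∈ PySem.List.sorted (PySem.Set.ofList vs) (fun v => v) false ↔ w ∈ vs := by
      intro w
      rw [PySem.List.mem_sorted, PySem.Set.mem_ofList]
    have hgo := closestGo_spec t (PySem.List.sorted (PySem.Set.ofList vs) (fun v => v) false)
      none (PySem.List.sorted (PySem.Set.ofList vs) (fun v => v) false)
      (PySem.List.sorted_ofList_pairwise_lt vs) (by simp) (fun u hu => hu)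
      (fun w hw => Or.inl hw)
    cases hres : pvClosestGo t none (PySem.List.sorted (PySem.Set.ofList vs) (fun v => v) false) with
    | none =>
      rw [hres] at hgo
      exact absurd ((PySem.List.sorted_eq_nil_iff _ _ _).mp hgo.2) hofne
    | some m₂ =>
      rw [hres] at hgo
      obtain ⟨hm₂mem, hm₂all⟩ := hgo
      have h12 : pvLe t m₁ m₂ := hm₁all m₂ ((hmemsl m₂).mp hm₂mem)
      have h21 : pvLe t m₂ m₁ := hm₂all m₁ ((hmemsl m₁).mpr hm₁mem)
      rw [hmin]
      unfold pvClosest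
      rw [hres]
      exact congrArg some (pvLe_antisymm h12 h21)

-- min2? commutes with mapping the elements (the keys are read through the map)
lemma min2?_map {α β : Type} (f : α → β) (l : List α) (k1 k2 : β → Int) :
    PySem.List.min2? (l.map f) k1 k2 =
      Option.map f (PySem.List.min2? l (fun a => k1 (f a)) (fun a => k2 (f a))) := by
  unfold PySem.List.min2?
  suffices h : ∀ acc : Option α,
      (l.map f).foldl (fun acc x =>
        match acc with
        | none => some x
        | some m => if (decide (k1 x < k1 m) || !decide (k1 m < k1 x) && decide (k2 x < k2 m)) then some x else some m)
        (Option.map f acc) =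
      Option.map f (l.foldl (fun acc x =>
        match acc with
        | none => some x
        | some m => if (decide (k1 (f x) < k1 (f m)) || !decide (k1 (f m) < k1 (f x)) && decide (k2 (f x) < k2 (f m))) then some x else some m)
        acc) from h none
  induction l with
  | nil => intro acc; rfl
  | cons a rest ih =>
    intro acc
    cases acc with
    | none => exact ih (some a)
    | some m =>
      simp only [List.map_cons, List.foldl_cons]
      by_cases h : (decide (k1 (f a) < k1 (f m)) || !decide (k1 (f m) < k1 (f a)) && decide (k2 (f a) < k2 (f m))) = true
      · simpa [h] using ih (some a)
      · simpa [h] using ih (some m)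

-- the filtered pair list is the coordinate list re-paired with the fixed coordinate
lemma col_map (points : List (Int × Int)) (x : Int) :
    (points.filter (fun p => p.1 == x)).map (fun p => (p.1, p.2)) =
      ((points.filter (fun p => p.1 == x)).map (fun p => p.2)).map (fun v => (x, v)) := by
  rw [List.map_map]
  apply List.map_congr_left
  intro p hp
  have h := (List.mem_filter.mp hp).2
  simp only [beq_iff_eq] at h
  simp [h]

lemma row_map (points : List (Int × Int)) (y : Int) :
    (points.filter (fun p => p.2 == y)).map (fun p => (p.1, p.2)) =
      ((points.filter (fun p => p.2 == y)).map (fun p => p.1)).map (fun v => (v, y)) := by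
  rw [List.map_map]
  apply List.map_congr_left
  intro p hp
  have h := (List.mem_filter.mp hp).2
  simp only [beq_iff_eq] at h
  simp [h]

-- ===== VERDICT (by name: the statement is the Claim_ definition above) =====
theorem get_possible_points_spec : Claim_equal_get_possible_points := by
  intro points position _
  unfold Spec_get_possible_points get_possible_points get_possible_points_alt
  simp only [List.nil_append, List.singleton_append]
  rw [col_map points position.1, row_map points position.2,
    min2?_map (fun v => ((position.1 : Int), v)), min2?_map (fun v => (v, (position.2 : Int)))]
  simp only []
  rw [min_eq_closest _ position.2, min_eq_closest _ position.1]
  cases pvClosest (PySem.List.sorted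
      (PySem.Set.ofList ((points.filter (fun p => p.1 == position.1)).map (fun p => p.2)))
      (fun v => v) false) position.2 <;>
    cases pvClosest (PySem.List.sorted
        (PySem.Set.ofList ((points.filter (fun p => p.2 == position.2)).map (fun p => p.1)))
        (fun v => v) false) position.1 <;>
      simp
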